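-- pv_equiv track=rewrite | github.com/EEB113B/hw4-Code-Review | 29.py | to_1D_array
-- ===== SOURCE A (Python) =====
-- def to_1D_array(Matrix, Major): #Matrix型態:list[list]，Major型態:str
--     size = len(Matrix)
--     B = [None] * ((1 + size) * size // 2)
--     total = 0
--     for x in range(1,size): #用兩個for迴圈把右上的數字相加，total為零時代表為左下三角形
--         for y in range(x-1):
--             total += Matrix[y][x]
--     if total == 0:  #為左下三角形
--         if Major == 'r':   #判別以列或行的形式印出
--             index = 0
--             for i in range(size):
--                 for j in range(0, i+1):
--                     B[index] = Matrix[i][j]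
--                     index += 1
--             return B
--         if Major == "c":
--             index = 0
--             for j in range(size):
--                 for i in range(j,size):
--                     B[index] = Matrix[i][j]
--                     index += 1
--             return B
--     total = 0
--     for x in range(size-1):  #用兩個for迴圈把左上的數字相加，total為零時代表為右下三角形
--         for y in range(size-x-1):
--             total += Matrix[y][x]
--     if total==0:  #為右下三角形
--         if Major == 'r':   #判別以列或行的形式印出
--             index = 0
--             for i in range(size):
--                 for j in range(size-1-i, size):
--                     B[index] = Matrix[i][j]
--                     index += 1
--             return B
--         if Major == "c":
--             index = 0
--             for j in range(size):
--                 for i in range(size-j-1,size):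
--                     B[index] = Matrix[i][j]
--                     index += 1
--             return B
--     total = 0
--     for y in range(1,size):  #用兩個for迴圈把左下的數字相加，total為零時代表為右上三角形
--         for x in range(y):
--             total += Matrix[y][x]
--     if total==0: #為右上三角形
--         if Major == 'r':   #判別以列或行的形式印出
--             index = 0
--             for i in range(size):
--                 for j in range(i, size):
--                     B[index] = Matrix[i][j]
--                     index += 1
--             return B
--         if Major == "c":
--             index = 0
--             for j in range(size):
--                 for i in range(j+1):
--                     B[index] = Matrix[i][j]
--                     index += 1
--             return B
--     total = 0
--     for y in range(1,size):   #用兩個for迴圈把右下的數字相加，total為零時代表為左上三角形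
--         for x in range(size-y,size):
--             total += Matrix[y][x]
--     if total==0: #為左上三角形
--         if Major == 'r':  #判別以列或行的形式印出
--             index = 0
--             for i in range(size):
--                 for j in range(size-i):
--                     B[index] = Matrix[i][j]
--                     index += 1
--             return B
--         if Major == "c":
--             index = 0
--             for j in range(size):
--                 for i in range(size-j):
--                     B[index] = Matrix[i][j]
--                     index += 1
--             return B
-- ===== SOURCE B (Python) =====
-- def to_1D_array(Matrix, Major):
--     size = len(Matrix)
--     # one pass over the matrix maintaining the four region sums A computes in four passes
--     s1 = s2 = s3 = s4 = 0
--     for y, row in enumerate(Matrix):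
--         for x in range(size):
--             v = row[x]
--             if y <= x - 2:
--                 s1 += v
--             if x < size - 1 and y < size - x - 1:
--                 s2 += v
--             if x < y:
--                 s3 += v
--             if y >= 1 and x >= size - y:
--                 s4 += v
--     if s1 == 0:
--         tri = 'LL'
--     elif s2 == 0:
--         tri = 'RL'
--     elif s3 == 0:
--         tri = 'RU'
--     elif s4 == 0:
--         tri = 'LU'
--     else:
--         return None
--     if Major == 'r':
--         bounds = {'LL': lambda i: (0, i + 1), 'RL': lambda i: (size - 1 - i, size),
--                   'RU': lambda i: (i, size), 'LU': lambda i: (0, size - i)}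
--         lo_hi = bounds[tri]
--         return [Matrix[i][j] for i in range(size) for j in range(*lo_hi(i))]
--     if Major == 'c':
--         bounds = {'LL': lambda j: (j, size), 'RL': lambda j: (size - j - 1, size),
--                   'RU': lambda j: (0, j + 1), 'LU': lambda j: (0, size - j)}
--         lo_hi = bounds[tri]
--         return [Matrix[i][j] for j in range(size) for i in range(*lo_hi(j))]
--     return None
-- ===== Notes on version B (the rewrite author's own statement) =====
-- stated objective: alternative
-- what changed: A classifies the triangle with four separate double-loop scans and fills a preallocated [None]*T array by index assignment in eight copy-pasted loop pairs; B makes ONE pass over the matrix maintaining four region accumulators, picks the triangle by testing them in A's precedence order, and builds the output as a single comprehension driven by per-line (lo,hi) bounds selected from a (triangle, Major) dispatch.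
-- outside the precondition, e.g. on to_1D_array([[1], [2, 3]], 'r'): A returns [1, 2, 3], B raises IndexError
import Mathlib
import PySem

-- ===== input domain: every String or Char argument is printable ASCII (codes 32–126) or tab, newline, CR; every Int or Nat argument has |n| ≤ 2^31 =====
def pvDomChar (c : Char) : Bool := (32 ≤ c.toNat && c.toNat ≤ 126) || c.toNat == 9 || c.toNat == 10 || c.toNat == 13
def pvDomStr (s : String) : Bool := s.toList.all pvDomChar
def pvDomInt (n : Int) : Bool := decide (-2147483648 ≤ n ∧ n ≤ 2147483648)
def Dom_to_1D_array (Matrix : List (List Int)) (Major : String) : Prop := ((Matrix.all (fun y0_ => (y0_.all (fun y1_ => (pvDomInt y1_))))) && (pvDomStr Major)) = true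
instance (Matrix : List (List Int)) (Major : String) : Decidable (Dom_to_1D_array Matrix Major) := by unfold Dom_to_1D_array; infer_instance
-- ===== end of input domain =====

-- B replaces A's four detection passes by ONE pass keeping four accumulators and replaces A's
-- eight imperative fill-into-preallocated-array loops by a comprehension driven by per-line
-- bounds selected from (triangle, Major); objective: alternative (same cost, different shape).

-- ===== PORT A =====
-- Matrix[y][x]; exact under Pre_ (Pre_ keeps every access A makes in range)
def pvCell (Matrix : List (List Int)) (y x : Int) : Int :=
  PySem.List.pyGetD (PySem.List.pyGetD Matrix y []) x 0

-- A's 'total = 0; for u …: for w …: total += Matrix[.][.]' pattern (A repeats it four times)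
def pvSumLoop (outer : List Int) (inner : Int → List Int) (val : Int → Int → Int) : Int :=
  outer.foldl (fun total u => (inner u).foldl (fun total w => total + val u w) total) 0

-- A's 'index = 0; for u …: for w …: B[index] = Matrix[.][.]; index += 1' pattern (eight times)
def pvFillLoop (outer : List Int) (inner : Int → List Int) (val : Int → Int → Int)
    (B0 : List Int) : List Int :=
  (outer.foldl
    (fun (st : List Int × Int) u =>
      (inner u).foldl
        (fun (st : List Int × Int) w => (st.1.set st.2.toNat (val u w), st.2 + 1)) st)
    (B0, 0)).1

def to_1D_array (Matrix : List (List Int)) (Major : String) : Option (List Int) :=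
  let size := PySem.List.len Matrix
  -- B = [None] * ((1 + size) * size // 2): 0 stands in for None — every returning branch
  -- performs exactly (1+size)*size//2 assignments at indices 0,1,2,…, overwriting every slot
  let B0 : List Int := List.replicate (PySem.Int.floordiv ((1 + size) * size) 2).toNat 0
  let R : Int → Int → List Int := fun a b => PySem.List.pyRange a b 1
  let t1 := pvSumLoop (R 1 size) (fun x => R 0 (x - 1)) (fun x y => pvCell Matrix y x)
  let t2 := pvSumLoop (R 0 (size - 1)) (fun x => R 0 (size - x - 1)) (fun x y => pvCell Matrix y x)
  let t3 := pvSumLoop (R 1 size) (fun y => R 0 y) (fun y x => pvCell Matrix y x)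
  let t4 := pvSumLoop (R 1 size) (fun y => R (size - y) size) (fun y x => pvCell Matrix y x)
  if t1 = 0 ∧ Major = "r" then
    some (pvFillLoop (R 0 size) (fun i => R 0 (i + 1)) (fun i j => pvCell Matrix i j) B0)
  else if t1 = 0 ∧ Major = "c" then
    some (pvFillLoop (R 0 size) (fun j => R j size) (fun j i => pvCell Matrix i j) B0)
  else if t2 = 0 ∧ Major = "r" then
    some (pvFillLoop (R 0 size) (fun i => R (size - 1 - i) size) (fun i j => pvCell Matrix i j) B0)
  else if t2 = 0 ∧ Major = "c" then
    some (pvFillLoop (R 0 size) (fun j => R (size - j - 1) size) (fun j i => pvCell Matrix i j) B0)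
  else if t3 = 0 ∧ Major = "r" then
    some (pvFillLoop (R 0 size) (fun i => R i size) (fun i j => pvCell Matrix i j) B0)
  else if t3 = 0 ∧ Major = "c" then
    some (pvFillLoop (R 0 size) (fun j => R 0 (j + 1)) (fun j i => pvCell Matrix i j) B0)
  else if t4 = 0 ∧ Major = "r" then
    some (pvFillLoop (R 0 size) (fun i => R 0 (size - i)) (fun i j => pvCell Matrix i j) B0)
  else if t4 = 0 ∧ Major = "c" then
    some (pvFillLoop (R 0 size) (fun j => R 0 (size - j)) (fun j i => pvCell Matrix i j) B0)
  else none

-- ===== PORT B =====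
-- B's single detection pass: four accumulators, each adding row[x] exactly on its region
def pvQuadPass (Matrix : List (List Int)) (size : Int) : Int × Int × Int × Int :=
  (PySem.List.enumerate Matrix 0).foldl
    (fun (s : Int × Int × Int × Int) yr =>
      (PySem.List.pyRange 0 size 1).foldl
        (fun (s : Int × Int × Int × Int) x =>
          let y := yr.1
          let v := PySem.List.pyGetD yr.2 x 0
          (s.1 + (if y ≤ x - 2 then v else 0),
           s.2.1 + (if x < size - 1 ∧ y < size - x - 1 then v else 0),
           s.2.2.1 + (if x < y then v else 0),
           s.2.2.2 + (if 1 ≤ y ∧ size - y ≤ x then v else 0))) s)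
    (0, 0, 0, 0)

def to_1D_array_alt (Matrix : List (List Int)) (Major : String) : Option (List Int) :=
  let size := PySem.List.len Matrix
  let s := pvQuadPass Matrix size
  let tri? : Option String :=
    if s.1 = 0 then some "LL"
    else if s.2.1 = 0 then some "RL"
    else if s.2.2.1 = 0 then some "RU"
    else if s.2.2.2 = 0 then some "LU"
    else none
  match tri? with
  | none => none
  | some tri =>
    if Major = "r" then
      -- bounds[tri]: per-row column span (a dict of four lambdas in Source B)
      let loHi : Int → Int × Int :=
        if tri = "LL" then fun i => (0, i + 1)
        else if tri = "RL" then fun i => (size - 1 - i, size)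
        else if tri = "RU" then fun i => (i, size)
        else fun i => (0, size - i)
      some ((PySem.List.pyRange 0 size 1).flatMap (fun i =>
        (PySem.List.pyRange (loHi i).1 (loHi i).2 1).map (fun j => pvCell Matrix i j)))
    else if Major = "c" then
      -- bounds[tri]: per-column row span
      let loHi : Int → Int × Int :=
        if tri = "LL" then fun j => (j, size)
        else if tri = "RL" then fun j => (size - j - 1, size)
        else if tri = "RU" then fun j => (0, j + 1)
        else fun j => (0, size - j)
      some ((PySem.List.pyRange 0 size 1).flatMap (fun j =>
        (PySem.List.pyRange (loHi j).1 (loHi j).2 1).map (fun i => pvCell Matrix i j)))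
    else none

-- ===== PRECONDITION & SPEC =====
-- Pre_ excludes ragged matrices (some row shorter than len(Matrix)): there A raises IndexError
-- on most inputs, and where A happens to return (its detected branch never touches a missing
-- cell) that is an accident of which cells that branch reads; B itself raises on such inputs.
def Pre_to_1D_array (Matrix : List (List Int)) (Major : String) : Prop :=
  ∀ row ∈ Matrix, Matrix.length ≤ row.length
instance (Matrix : List (List Int)) (Major : String) : Decidable (Pre_to_1D_array Matrix Major) := by
  unfold Pre_to_1D_array; infer_instance

def pvWitness_to_1D_array : List (List Int) × String := ([[1, 0], [2, 3]], "r")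

def Spec_to_1D_array (Matrix : List (List Int)) (Major : String) (out : Option (List Int)) : Prop := out = to_1D_array_alt Matrix Major
instance (Matrix : List (List Int)) (Major : String) (out : Option (List Int)) : Decidable (Spec_to_1D_array Matrix Major out) := by unfold Spec_to_1D_array; infer_instance

-- ===== CLAIM (what is proved, stated in full; the proofs are below) =====
def Claim_equal_to_1D_array : Prop := ∀ (Matrix : List (List Int)) (Major : String), Dom_to_1D_array Matrix Major → Pre_to_1D_array Matrix Major → Spec_to_1D_array Matrix Major (to_1D_array Matrix Major)

-- ===== LEMMAS AND PROOFS =====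

theorem pv_take_set (n : Nat) (v : Int) (B : List Int) (h : n < B.length) :
    (B.set n v).take (n+1) = B.take n ++ [v] := by
  induction B generalizing n with
  | nil => simp at h
  | cons x xs ih =>
    cases n with
    | zero => simp
    | succ m => simp [List.set, List.take_succ_cons, ih m (by simpa using h)]

theorem pvSumLoop_eq (outer : List Int) (inner : Int → List Int) (val : Int → Int → Int) :
    pvSumLoop outer inner val = (outer.map (fun u => ((inner u).map (val u)).sum)).sum := by
  unfold pvSumLoop
  have h1 : outer.foldl (fun total u => (inner u).foldl (fun total w => total + val u w) total) 0
      = outer.foldl (fun total u => total + ((inner u).map (val u)).sum) 0 :=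
    PySem.List.foldl_congr_mem outer _ _ 0 (fun acc x _ => PySem.List.foldl_add _ _ _)
  rw [h1, PySem.List.foldl_add]; simp

theorem pv_sum_map_pyRange_aux (f : Int → Int) (n : Nat) : ∀ (a : Int),
    ((PySem.List.pyRange a (a + n) 1).map f).sum = ∑ x ∈ Finset.Ico a (a + (n:Int)), f x := by
  induction n with
  | zero => intro a; simp [PySem.List.pyRange_one_eq_nil]
  | succ m ih =>
    intro a
    have hb : (a : Int) + (↑(m+1) : Int) = (a + m) + 1 := by push_cast; ring
    rw [hb, PySem.List.pyRange_one_succ_right (by omega)]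
    rw [show Finset.Ico a (a + (m:Int) + 1) = insert (a + (m:Int)) (Finset.Ico a (a + (m:Int))) by
      ext x; simp only [Finset.mem_Ico, Finset.mem_insert]; omega]
    rw [Finset.sum_insert (by simp [Finset.mem_Ico]), List.map_append, List.sum_append, ih a]
    simp [add_comm]

theorem pv_sum_map_pyRange (a b : Int) (f : Int → Int) :
    ((PySem.List.pyRange a b 1).map f).sum = ∑ x ∈ Finset.Ico a b, f x := by
  by_cases h : a ≤ b
  · have := pv_sum_map_pyRange_aux f (b - a).toNat a
    rwa [show a + ((b-a).toNat : Int) = b by omega] at this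
  · rw [PySem.List.pyRange_one_eq_nil (by omega), Finset.Ico_eq_empty (by omega)]; simp

theorem pv_foldl_quad {α : Type} (l : List α) (f1 f2 f3 f4 : α → Int) : ∀ (a b c d : Int),
    l.foldl (fun (s : Int × Int × Int × Int) x =>
        (s.1 + f1 x, s.2.1 + f2 x, s.2.2.1 + f3 x, s.2.2.2 + f4 x)) (a, b, c, d)
      = (a + (l.map f1).sum, b + (l.map f2).sum, c + (l.map f3).sum, d + (l.map f4).sum) := by
  induction l with
  | nil => simp
  | cons x xs ih => intro a b c d; simp [ih]; refine ⟨by ring, by ring, by ring, by ring⟩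

theorem pv_fill_go (ws : List Int) : ∀ (B : List Int) (n : Nat), B.length = n + ws.length →
    (ws.foldl (fun (st : List Int × Int) v => (st.1.set st.2.toNat v, st.2 + 1)) (B, (n : Int))).1
      = B.take n ++ ws := by
  induction ws with
  | nil => intro B n h; simp at h; simp [List.take_of_length_le (le_of_eq h)]
  | cons v ws ih =>
    intro B n h
    simp only [List.length_cons] at h
    have hcast : ((n : Int) + 1) = ((n + 1 : Nat) : Int) := by push_cast; ring
    simp only [List.foldl_cons, Int.toNat_natCast, hcast]
    rw [ih (B.set n v) (n+1) (by simp; omega)]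
    rw [pv_take_set n v B (by omega)]
    simp

theorem pvFillLoop_eq (outer : List Int) (inner : Int → List Int) (val : Int → Int → Int)
    (B0 : List Int) (h : (outer.flatMap (fun u => (inner u).map (val u))).length = B0.length) :
    pvFillLoop outer inner val B0 = outer.flatMap (fun u => (inner u).map (val u)) := by
  unfold pvFillLoop
  have hstep : outer.foldl
      (fun (st : List Int × Int) u =>
        (inner u).foldl
          (fun (st : List Int × Int) w => (st.1.set st.2.toNat (val u w), st.2 + 1)) st)
      (B0, 0)
      = (outer.flatMap (fun u => (inner u).map (val u))).foldl
          (fun (st : List Int × Int) v => (st.1.set st.2.toNat v, st.2 + 1)) (B0, 0) := by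
    rw [List.foldl_flatMap]
    exact (PySem.List.foldl_congr_mem outer _ _ (B0, 0)
      (fun st u _ => by rw [List.foldl_map])).symm
  rw [hstep]
  have h0 : (0 : Int) = ((0 : Nat) : Int) := rfl
  rw [h0, pv_fill_go _ B0 0 (by omega)]
  simp

theorem pv_gauss1 (m : Nat) : ((List.range m).map (fun k => k + 1)).sum = (1 + m) * m / 2 := by
  have h2 : 2 * ((List.range m).map (fun k => k + 1)).sum = (1 + m) * m := by
    induction m with
    | zero => simp
    | succ k ih =>
      rw [List.range_succ, List.map_append, List.sum_append, Nat.mul_add, ih]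
      simp; ring
  omega

theorem pv_gauss2 (m : Nat) : ((List.range m).map (fun k => m - k)).sum = (1 + m) * m / 2 := by
  have key : ∀ p : Nat, ((List.range p).map (fun k => p - k)).sum
      = ((List.range p).map (fun k => k + 1)).sum := by
    intro p
    induction p with
    | zero => simp
    | succ q ih =>
      have hL : ((List.range (q+1)).map (fun k => q+1-k)).sum
          = (q+1) + ((List.range q).map (fun k => q-k)).sum := by
        rw [List.range_succ_eq_map, List.map_cons, List.map_map, List.sum_cons]
        rw [List.map_congr_left (fun k (_ : k ∈ List.range q) => by
          simp only [Function.comp_apply]; omega :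
          ∀ k ∈ List.range q, ((fun k => q+1-k) ∘ Nat.succ) k = q - k)]
        simp
      have hR : ((List.range (q+1)).map (fun k => k+1)).sum
          = ((List.range q).map (fun k => k+1)).sum + (q+1) := by
        rw [List.range_succ]; simp
      rw [hL, hR, ih]; omega
  rw [key]; exact pv_gauss1 m

theorem pv_sumLoop_Ico (a b : Int) (inner : Int → List Int) (lo hi : Int → Int)
    (val : Int → Int → Int) (hinner : ∀ u, inner u = PySem.List.pyRange (lo u) (hi u) 1) :
    pvSumLoop (PySem.List.pyRange a b 1) inner val
      = ∑ u ∈ Finset.Ico a b, ∑ w ∈ Finset.Ico (lo u) (hi u), val u w := by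
  rw [pvSumLoop_eq, pv_sum_map_pyRange]
  exact Finset.sum_congr rfl (fun u _ => by rw [hinner u, pv_sum_map_pyRange])

theorem pv_flat_len (m : Nat) (inner : Int → List Int) (cnt : Nat → Nat)
    (h : ∀ k, k < m → (inner (k : Int)).length = cnt k) :
    ((PySem.List.pyRange 0 (m : Int) 1).flatMap inner).length = ((List.range m).map cnt).sum := by
  rw [List.length_flatMap, PySem.List.pyRange_one]
  simp only [List.map_map, Int.sub_zero, Int.toNat_natCast]
  apply congrArg
  apply List.map_congr_left
  intro k hk
  simp only [Function.comp_apply, List.mem_range] at *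
  rw [show ((0:Int) + k) = (k:Int) by omega, h k hk]

theorem pv_T (m : Nat) : (PySem.Int.floordiv ((1 + (m:Int)) * m) 2).toNat = (1 + m) * m / 2 := by
  rw [show ((1:Int) + m) * m = (((1+m)*m : Nat) : Int) by push_cast; ring,
    show (2:Int) = ((2:Nat):Int) from rfl, PySem.Int.floordiv_natCast]
  omega

theorem pv_region1 (n : Int) (g : Int → Int → Int) :
    (∑ y ∈ Finset.Ico (0:Int) n, ∑ x ∈ Finset.Ico (0:Int) n, if y ≤ x - 2 then g x y else 0)
      = ∑ x ∈ Finset.Ico (1:Int) n, ∑ y ∈ Finset.Ico (0:Int) (x - 1), g x y := by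
  rw [Finset.sum_comm]
  rw [Finset.sum_congr rfl (fun x hx => ?_)]
  · symm
    apply Finset.sum_subset
    · apply Finset.Ico_subset_Ico <;> omega
    · intro x hx hnx
      simp only [Finset.mem_Ico] at hx hnx
      rw [Finset.Ico_eq_empty (by omega), Finset.sum_empty]
  · simp only [Finset.mem_Ico] at hx
    rw [← Finset.sum_filter]
    congr 1
    ext y
    simp only [Finset.mem_filter, Finset.mem_Ico]
    omega

theorem pv_region2 (n : Int) (g : Int → Int → Int) :
    (∑ y ∈ Finset.Ico (0:Int) n, ∑ x ∈ Finset.Ico (0:Int) n, if x < n - 1 ∧ y < n - x - 1 then g x y else 0)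
      = ∑ x ∈ Finset.Ico (0:Int) (n - 1), ∑ y ∈ Finset.Ico (0:Int) (n - x - 1), g x y := by
  rw [Finset.sum_comm]
  have h1 : ∀ x ∈ Finset.Ico (0:Int) n,
      (∑ y ∈ Finset.Ico (0:Int) n, if x < n - 1 ∧ y < n - x - 1 then g x y else 0)
        = if x < n - 1 then ∑ y ∈ Finset.Ico (0:Int) (n - x - 1), g x y else 0 := by
    intro x hx
    simp only [Finset.mem_Ico] at hx
    by_cases hP : x < n - 1
    · rw [if_pos hP]
      calc (∑ y ∈ Finset.Ico (0:Int) n, if x < n - 1 ∧ y < n - x - 1 then g x y else 0)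
          = ∑ y ∈ Finset.Ico (0:Int) n, if y < n - x - 1 then g x y else 0 := by
            apply Finset.sum_congr rfl; intro y _; simp [hP]
        _ = ∑ y ∈ (Finset.Ico (0:Int) n).filter (fun y => y < n - x - 1), g x y :=
            (Finset.sum_filter _ _).symm
        _ = ∑ y ∈ Finset.Ico (0:Int) (n - x - 1), g x y := by
            apply Finset.sum_congr ?_ (fun _ _ => rfl)
            ext y; simp only [Finset.mem_filter, Finset.mem_Ico]; omega
    · rw [if_neg hP]; apply Finset.sum_eq_zero; intro y _; simp [hP]
  rw [Finset.sum_congr rfl h1, ← Finset.sum_filter (fun x => x < n - 1)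
    (fun x => ∑ y ∈ Finset.Ico (0:Int) (n - x - 1), g x y)]
  apply Finset.sum_congr ?_ (fun _ _ => rfl)
  ext x; simp only [Finset.mem_filter, Finset.mem_Ico]; omega

theorem pv_region3 (n : Int) (g : Int → Int → Int) :
    (∑ y ∈ Finset.Ico (0:Int) n, ∑ x ∈ Finset.Ico (0:Int) n, if x < y then g y x else 0)
      = ∑ y ∈ Finset.Ico (1:Int) n, ∑ x ∈ Finset.Ico (0:Int) y, g y x := by
  rw [Finset.sum_congr rfl (fun y hy => ?_)]
  · symm
    apply Finset.sum_subset
    · apply Finset.Ico_subset_Ico <;> omega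
    · intro y hy hny
      simp only [Finset.mem_Ico] at hy hny
      rw [Finset.Ico_eq_empty (by omega), Finset.sum_empty]
  · simp only [Finset.mem_Ico] at hy
    rw [← Finset.sum_filter]
    congr 1
    ext x
    simp only [Finset.mem_filter, Finset.mem_Ico]
    omega

theorem pv_region4 (n : Int) (g : Int → Int → Int) :
    (∑ y ∈ Finset.Ico (0:Int) n, ∑ x ∈ Finset.Ico (0:Int) n, if 1 ≤ y ∧ n - y ≤ x then g y x else 0)
      = ∑ y ∈ Finset.Ico (1:Int) n, ∑ x ∈ Finset.Ico (n - y) n, g y x := by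
  have h1 : ∀ y ∈ Finset.Ico (0:Int) n,
      (∑ x ∈ Finset.Ico (0:Int) n, if 1 ≤ y ∧ n - y ≤ x then g y x else 0)
        = if 1 ≤ y then ∑ x ∈ Finset.Ico (n - y) n, g y x else 0 := by
    intro y hy
    simp only [Finset.mem_Ico] at hy
    by_cases hP : 1 ≤ y
    · rw [if_pos hP]
      calc (∑ x ∈ Finset.Ico (0:Int) n, if 1 ≤ y ∧ n - y ≤ x then g y x else 0)
          = ∑ x ∈ Finset.Ico (0:Int) n, if n - y ≤ x then g y x else 0 := by
            apply Finset.sum_congr rfl; intro x _; simp [hP]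
        _ = ∑ x ∈ (Finset.Ico (0:Int) n).filter (fun x => n - y ≤ x), g y x :=
            (Finset.sum_filter _ _).symm
        _ = ∑ x ∈ Finset.Ico (n - y) n, g y x := by
            apply Finset.sum_congr ?_ (fun _ _ => rfl)
            ext x; simp only [Finset.mem_filter, Finset.mem_Ico]; omega
    · rw [if_neg hP]; apply Finset.sum_eq_zero; intro x _; simp [hP]
  rw [Finset.sum_congr rfl h1, ← Finset.sum_filter (fun y => 1 ≤ y)
    (fun y => ∑ x ∈ Finset.Ico (n - y) n, g y x)]
  apply Finset.sum_congr ?_ (fun _ _ => rfl)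
  ext y; simp only [Finset.mem_filter, Finset.mem_Ico]; omega


theorem pv_detect (Matrix : List (List Int)) (n : Int) :
    pvQuadPass Matrix n
    = (∑ y ∈ Finset.Ico (0:Int) (Matrix.length : Int), ∑ x ∈ Finset.Ico (0:Int) n,
         if y ≤ x - 2 then pvCell Matrix y x else 0,
       ∑ y ∈ Finset.Ico (0:Int) (Matrix.length : Int), ∑ x ∈ Finset.Ico (0:Int) n,
         if x < n - 1 ∧ y < n - x - 1 then pvCell Matrix y x else 0,
       ∑ y ∈ Finset.Ico (0:Int) (Matrix.length : Int), ∑ x ∈ Finset.Ico (0:Int) n,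
         if x < y then pvCell Matrix y x else 0,
       ∑ y ∈ Finset.Ico (0:Int) (Matrix.length : Int), ∑ x ∈ Finset.Ico (0:Int) n,
         if 1 ≤ y ∧ n - y ≤ x then pvCell Matrix y x else 0) := by
  unfold pvQuadPass
  rw [show PySem.List.enumerate Matrix 0 = (PySem.List.pyRange 0 (PySem.List.len Matrix) 1).map
      (fun j => (j, PySem.List.pyGetD Matrix j [])) from PySem.List.enumerate_eq_map_pyRange Matrix []]
  rw [List.foldl_map, PySem.List.len_eq]
  trans ((PySem.List.pyRange 0 (Matrix.length : Int) 1).foldl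
      (fun (s : Int × Int × Int × Int) j =>
        (s.1 + ((PySem.List.pyRange 0 n 1).map
            (fun x => if j ≤ x - 2 then pvCell Matrix j x else 0)).sum,
         s.2.1 + ((PySem.List.pyRange 0 n 1).map
            (fun x => if x < n - 1 ∧ j < n - x - 1 then pvCell Matrix j x else 0)).sum,
         s.2.2.1 + ((PySem.List.pyRange 0 n 1).map
            (fun x => if x < j then pvCell Matrix j x else 0)).sum,
         s.2.2.2 + ((PySem.List.pyRange 0 n 1).map
            (fun x => if 1 ≤ j ∧ n - j ≤ x then pvCell Matrix j x else 0)).sum))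
      (0, 0, 0, 0))
  · exact PySem.List.foldl_congr_mem _ _ _ _
      (fun s j _ => pv_foldl_quad _ _ _ _ _ s.1 s.2.1 s.2.2.1 s.2.2.2)
  · rw [pv_foldl_quad]
    simp only [zero_add]
    refine congrArg₂ Prod.mk ?_ (congrArg₂ Prod.mk ?_ (congrArg₂ Prod.mk ?_ ?_)) <;>
      · rw [pv_sum_map_pyRange]
        exact Finset.sum_congr rfl (fun y _ => pv_sum_map_pyRange _ _ _)


-- ===== VERDICT (by name: the statement is the Claim_ definition above) =====
theorem to_1D_array_spec : Claim_equal_to_1D_array := by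
  intro Matrix Major _ _
  unfold Spec_to_1D_array
  simp only [to_1D_array, to_1D_array_alt, PySem.List.len_eq]
  have hA1 := pv_sumLoop_Ico 1 (↑Matrix.length) (fun x => PySem.List.pyRange 0 (x - 1) 1)
    (fun _ => 0) (fun x => x - 1) (fun x y => pvCell Matrix y x) (fun u => rfl)
  have hA2 := pv_sumLoop_Ico 0 (↑Matrix.length - 1)
    (fun x => PySem.List.pyRange 0 (↑Matrix.length - x - 1) 1)
    (fun _ => 0) (fun x => (↑Matrix.length : Int) - x - 1) (fun x y => pvCell Matrix y x)
    (fun u => rfl)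
  have hA3 := pv_sumLoop_Ico 1 (↑Matrix.length) (fun y => PySem.List.pyRange 0 y 1)
    (fun _ => 0) (fun y => y) (fun y x => pvCell Matrix y x) (fun u => rfl)
  have hA4 := pv_sumLoop_Ico 1 (↑Matrix.length)
    (fun y => PySem.List.pyRange (↑Matrix.length - y) (↑Matrix.length) 1)
    (fun y => (↑Matrix.length : Int) - y) (fun _ => (↑Matrix.length : Int))
    (fun y x => pvCell Matrix y x) (fun u => rfl)
  simp only [pv_detect, hA1, hA2, hA3, hA4,
    ← pv_region1 (↑Matrix.length) (fun x y => pvCell Matrix y x),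
    ← pv_region2 (↑Matrix.length) (fun x y => pvCell Matrix y x),
    ← pv_region3 (↑Matrix.length) (fun y x => pvCell Matrix y x),
    ← pv_region4 (↑Matrix.length) (fun y x => pvCell Matrix y x)]
  have hlen8 : ∀ (inner : Int → List Int) (cnt : Nat → Nat),
      (∀ k, k < Matrix.length → (inner (k : Int)).length = cnt k) →
      ((List.range Matrix.length).map cnt).sum = (1 + Matrix.length) * Matrix.length / 2 →
      ((PySem.List.pyRange 0 (↑Matrix.length : Int) 1).flatMap inner).length
        = (List.replicate (PySem.Int.floordiv ((1 + (↑Matrix.length : Int)) * ↑Matrix.length) 2).toNat (0:Int)).length := by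
    intro inner cnt h hg
    rw [pv_flat_len _ inner cnt h, hg, List.length_replicate, pv_T]
  have hf1r := pvFillLoop_eq (PySem.List.pyRange 0 (↑Matrix.length : Int) 1)
    (fun i => PySem.List.pyRange 0 (i + 1) 1) (fun i j => pvCell Matrix i j) _
    (hlen8 _ (fun k => k + 1)
      (fun k hk => by simp only [List.length_map, PySem.List.length_pyRange_one]; omega) (pv_gauss1 _))
  have hf1c := pvFillLoop_eq (PySem.List.pyRange 0 (↑Matrix.length : Int) 1)
    (fun j => PySem.List.pyRange j (↑Matrix.length) 1) (fun x y => pvCell Matrix y x) _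
    (hlen8 _ (fun k => Matrix.length - k)
      (fun k hk => by simp only [List.length_map, PySem.List.length_pyRange_one]; omega) (pv_gauss2 _))
  have hf2r := pvFillLoop_eq (PySem.List.pyRange 0 (↑Matrix.length : Int) 1)
    (fun i => PySem.List.pyRange (↑Matrix.length - 1 - i) (↑Matrix.length) 1)
    (fun i j => pvCell Matrix i j) _
    (hlen8 _ (fun k => k + 1)
      (fun k hk => by simp only [List.length_map, PySem.List.length_pyRange_one]; omega) (pv_gauss1 _))
  have hf2c := pvFillLoop_eq (PySem.List.pyRange 0 (↑Matrix.length : Int) 1)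
    (fun j => PySem.List.pyRange (↑Matrix.length - j - 1) (↑Matrix.length) 1)
    (fun x y => pvCell Matrix y x) _
    (hlen8 _ (fun k => k + 1)
      (fun k hk => by simp only [List.length_map, PySem.List.length_pyRange_one]; omega) (pv_gauss1 _))
  have hf3r := pvFillLoop_eq (PySem.List.pyRange 0 (↑Matrix.length : Int) 1)
    (fun j => PySem.List.pyRange j (↑Matrix.length) 1) (fun i j => pvCell Matrix i j) _
    (hlen8 _ (fun k => Matrix.length - k)
      (fun k hk => by simp only [List.length_map, PySem.List.length_pyRange_one]; omega) (pv_gauss2 _))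
  have hf3c := pvFillLoop_eq (PySem.List.pyRange 0 (↑Matrix.length : Int) 1)
    (fun i => PySem.List.pyRange 0 (i + 1) 1) (fun x y => pvCell Matrix y x) _
    (hlen8 _ (fun k => k + 1)
      (fun k hk => by simp only [List.length_map, PySem.List.length_pyRange_one]; omega) (pv_gauss1 _))
  have hf4r := pvFillLoop_eq (PySem.List.pyRange 0 (↑Matrix.length : Int) 1)
    (fun i => PySem.List.pyRange 0 (↑Matrix.length - i) 1) (fun i j => pvCell Matrix i j) _
    (hlen8 _ (fun k => Matrix.length - k)
      (fun k hk => by simp only [List.length_map, PySem.List.length_pyRange_one]; omega) (pv_gauss2 _))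
  have hf4c := pvFillLoop_eq (PySem.List.pyRange 0 (↑Matrix.length : Int) 1)
    (fun i => PySem.List.pyRange 0 (↑Matrix.length - i) 1) (fun x y => pvCell Matrix y x) _
    (hlen8 _ (fun k => Matrix.length - k)
      (fun k hk => by simp only [List.length_map, PySem.List.length_pyRange_one]; omega) (pv_gauss2 _))
  simp only [PySem.Int.floordiv_eq_ediv_of_pos (by norm_num : (0:Int) < 2)]
    at hf1r hf1c hf2r hf2c hf3r hf3c hf4r hf4c
  by_cases h1 : (∑ y ∈ Finset.Ico (0:Int) (↑Matrix.length : Int), ∑ x ∈ Finset.Ico (0:Int) (↑Matrix.length : Int),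
      if y ≤ x - 2 then pvCell Matrix y x else 0) = 0 <;>
  by_cases h2 : (∑ y ∈ Finset.Ico (0:Int) (↑Matrix.length : Int), ∑ x ∈ Finset.Ico (0:Int) (↑Matrix.length : Int),
      if x < ↑Matrix.length - 1 ∧ y < ↑Matrix.length - x - 1 then pvCell Matrix y x else 0) = 0 <;>
  by_cases h3 : (∑ y ∈ Finset.Ico (0:Int) (↑Matrix.length : Int), ∑ x ∈ Finset.Ico (0:Int) (↑Matrix.length : Int),
      if x < y then pvCell Matrix y x else 0) = 0 <;>
  by_cases h4 : (∑ y ∈ Finset.Ico (0:Int) (↑Matrix.length : Int), ∑ x ∈ Finset.Ico (0:Int) (↑Matrix.length : Int),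
      if 1 ≤ y ∧ (↑Matrix.length : Int) ≤ x + y then pvCell Matrix y x else 0) = 0 <;>
  by_cases hr : Major = "r" <;>
  by_cases hc : Major = "c" <;>
  simp [h1, h2, h3, h4, hr, hc, hf1r, hf1c, hf2r, hf2c, hf3r, hf3c, hf4r, hf4c]
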